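-- pv_equiv track=rewrite | github.com/jurasofish/mangum | mangum/handlers/aws_alb.py | all_casings
-- ===== SOURCE A (Python) =====
-- from typing import Any, Dict, Generator, List, Tuple
--
-- def all_casings(input_string: str) -> Generator:
--     """
--     Permute all casings of a given string.
--     A pretty algoritm, via @Amber
--     http://stackoverflow.com/questions/6792803/finding-all-possible-case-permutations-in-python
--     """
--     if not input_string:
--         yield ""
--     else:
--         first = input_string[:1]
--         if first.lower() == first.upper():
--             for sub_casing in all_casings(input_string[1:]):
--                 yield first + sub_casing
--         else:
--             for sub_casing in all_casings(input_string[1:]):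
--                 yield first.lower() + sub_casing
--                 yield first.upper() + sub_casing
-- ===== SOURCE B (Python) =====
-- def all_casings(input_string):
--     """Iteratively build all case permutations back-to-front with an accumulator."""
--     res = [""]
--     for c in reversed(input_string):
--         opts = [c] if c.lower() == c.upper() else [c.lower(), c.upper()]
--         res = [x + r for r in res for x in opts]
--     yield from res
-- ===== Notes on version B (the rewrite author's own statement) =====
-- stated objective: alternative
-- what changed: Replaced the recursion over the string's tail (a generator recursing on input_string[1:]) by a single iterative right-to-left loop that builds the full result list with an accumulator (res = [x + r for r in res for x in opts]).
import Mathlib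
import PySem

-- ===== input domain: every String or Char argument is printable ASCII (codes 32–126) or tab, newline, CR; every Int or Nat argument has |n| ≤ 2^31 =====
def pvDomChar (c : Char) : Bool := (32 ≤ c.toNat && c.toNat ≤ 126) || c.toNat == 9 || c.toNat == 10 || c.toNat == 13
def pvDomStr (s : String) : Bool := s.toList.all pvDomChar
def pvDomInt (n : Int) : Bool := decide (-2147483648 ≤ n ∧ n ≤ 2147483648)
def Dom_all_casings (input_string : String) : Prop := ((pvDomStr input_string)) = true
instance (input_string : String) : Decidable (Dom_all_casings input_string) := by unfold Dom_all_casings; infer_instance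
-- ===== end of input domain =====

-- B replaces A's recursion over the string's tail by a single right-to-left loop over the
-- characters with an explicit accumulator of results (objective: alternative decomposition).
-- Both Pythons are generators; equivalence is about the sequence of yielded values (as a list).

-- ===== PORT A =====
-- A's recursion, on the character list of the string; a yielded string is its character list,
-- collected to String at the top.
def pvAcA : List Char → List (List Char)
  | [] => [[]]
  | c :: rest =>
    -- first = input_string[:1]; first.lower() / first.upper() on the one-char string = per-char case maps
    let l := PySem.Chars.lowerChar c
    let u := PySem.Chars.upperChar c
    if l == u then
      (pvAcA rest).map (fun sub => c :: sub)
    else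
      (pvAcA rest).flatMap (fun sub => [l :: sub, u :: sub])

def all_casings (input_string : String) : List String :=
  (pvAcA input_string.toList).map String.ofList

-- ===== PORT B =====
-- B's loop: res = [""]; for c in reversed(s): res = [x + r for r in res for x in opts]
def pvStepB (res : List (List Char)) (c : Char) : List (List Char) :=
  let opts := if PySem.Chars.lowerChar c == PySem.Chars.upperChar c
              then [c] else [PySem.Chars.lowerChar c, PySem.Chars.upperChar c]
  res.flatMap (fun r => opts.map (fun x => x :: r))

def all_casings_alt (input_string : String) : List String :=
  ((input_string.toList.reverse.foldl pvStepB [[]]).map String.ofList)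

-- ===== PRECONDITION & SPEC =====
def Spec_all_casings (input_string : String) (out : List String) : Prop := out = all_casings_alt input_string
instance (input_string : String) (out : List String) : Decidable (Spec_all_casings input_string out) := by unfold Spec_all_casings; infer_instance

-- ===== CLAIM (what is proved, stated in full; the proofs are below) =====
def Claim_equal_all_casings : Prop := ∀ (input_string : String), Dom_all_casings input_string → Spec_all_casings input_string (all_casings input_string)

-- ===== LEMMAS AND PROOFS =====
-- B's right-to-left foldl is the foldr of one step, and each step agrees with A's recursion.
lemma pvAcA_eq_fold (cs : List Char) : cs.reverse.foldl pvStepB [[]] = pvAcA cs := by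
  rw [List.foldl_reverse]
  induction cs with
  | nil => rfl
  | cons c rest ih =>
    rw [List.foldr_cons, ih]
    show pvStepB (pvAcA rest) c = _
    simp only [pvStepB, pvAcA]
    split <;> [skip; simp [List.flatMap]]
    induction pvAcA rest <;> simp_all

-- ===== VERDICT (by name: the statement is the Claim_ definition above) =====
theorem all_casings_spec : Claim_equal_all_casings := by
  intro s _
  unfold Spec_all_casings all_casings all_casings_alt
  rw [pvAcA_eq_fold]
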